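-- pv_equiv track=rewrite | github.com/light0220/Excel-operate | excel_operate/list_operate.py | is_delete
-- ===== SOURCE A (Python) =====
-- def is_delete(srcl: list, tagl: list):
--     '''===================================\n
--     传入两个列表，判断目标列表是否为原列表删除元素所得。如果判断为是则返回一个以删除位置索引为键，该索引位置删除的元素个数为值的一个字典；否则返回None。
--     srcl: 原列表
--     tagl: 目标列表
--     '''
--     delete_info = {}
--     for i in srcl:
--         if i not in tagl:
--             if srcl.index(i) not in delete_info:
--                 delete_info[srcl.index(i)] = 1
--             else:
--                 delete_info[srcl.index(i)] += 1
--     if delete_info == {}: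
--         return None
--     else:
--         return delete_info
-- ===== SOURCE B (Python) =====
-- def is_delete(srcl: list, tagl: list):
--     '''Same result as A: index-comprehension over first occurrences instead of an
--     accumulating loop; each count computed once with srcl.count.'''
--     pairs = [(j, srcl.count(v)) for j, v in enumerate(srcl)
--              if v not in tagl and v not in srcl[:j]]
--     return dict(pairs) if pairs else None
-- ===== Notes on version B (the rewrite author's own statement) =====
-- stated objective: alternative
-- what changed: Replaces A's accumulating loop (per-element srcl.index lookups, membership test in the growing dict, += 1 updates) by a single index-based comprehension that keeps only first occurrences (v not in srcl[:j]) and computes each count directly with srcl.count.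
import Mathlib
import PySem

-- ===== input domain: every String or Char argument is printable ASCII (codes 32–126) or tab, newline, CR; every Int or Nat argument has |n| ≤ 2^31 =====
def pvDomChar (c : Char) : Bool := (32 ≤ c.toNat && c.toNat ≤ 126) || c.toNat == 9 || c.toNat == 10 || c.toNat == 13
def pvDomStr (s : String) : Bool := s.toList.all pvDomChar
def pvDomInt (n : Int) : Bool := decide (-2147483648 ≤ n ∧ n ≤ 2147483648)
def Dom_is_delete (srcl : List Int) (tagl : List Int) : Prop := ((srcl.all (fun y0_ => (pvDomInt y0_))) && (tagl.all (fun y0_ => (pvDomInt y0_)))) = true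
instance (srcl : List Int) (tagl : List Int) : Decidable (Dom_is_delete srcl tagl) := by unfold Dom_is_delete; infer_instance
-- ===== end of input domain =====

-- B replaces A's accumulating loop by a first-occurrence comprehension with direct counts; same results (alternative decomposition, no speed claim).

-- ===== PORT A =====
def is_delete (srcl : List Int) (tagl : List Int) : Option (List (Int × Int)) :=
  let d : PySem.Dict Int Int := srcl.foldl (fun d i =>
    if ¬ tagl.contains i then
      let k : Int := (((PySem.List.index? srcl i).getD 0 : Nat) : Int)
      if ¬ d.contains k then d.insert k 1 else d.insert k (d.getD k 0 + 1)
    else d) PySem.Dict.empty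
  if d.items = [] then none else some d.items

-- ===== PORT B =====
def is_delete_alt (srcl : List Int) (tagl : List Int) : Option (List (Int × Int)) :=
  let pairs : List (Int × Int) := (PySem.List.enumerate srcl 0).filterMap (fun p =>
    if (!tagl.contains p.2) && (!(PySem.List.slice srcl none (some p.1)).contains p.2) then
      some (p.1, (PySem.List.count srcl p.2 : Int))
    else none)
  if pairs = [] then none else some (PySem.Dict.ofList pairs).items

-- ===== PRECONDITION & SPEC =====
def Spec_is_delete (srcl : List Int) (tagl : List Int) (out : Option (List (Int × Int))) : Prop := out = is_delete_alt srcl tagl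
instance (srcl : List Int) (tagl : List Int) (out : Option (List (Int × Int))) : Decidable (Spec_is_delete srcl tagl out) := by unfold Spec_is_delete; infer_instance

-- ===== CLAIM (what is proved, stated in full; the proofs are below) =====
def Claim_equal_is_delete : Prop := ∀ (srcl : List Int) (tagl : List Int), Dom_is_delete srcl tagl → Spec_is_delete srcl tagl (is_delete srcl tagl)

-- ===== LEMMAS AND PROOFS =====

def pvIdx (srcl : List Int) (v : Int) : Int := (((PySem.List.index? srcl v).getD 0 : Nat) : Int)

theorem pvIdx_inj {srcl : List Int} {v w : Int} (hv : v ∈ srcl) (hw : w ∈ srcl)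
    (h : pvIdx srcl v = pvIdx srcl w) : v = w := by
  obtain ⟨kv, hkv⟩ := Option.isSome_iff_exists.mp ((PySem.List.index?_isSome_iff srcl v).mpr hv)
  obtain ⟨kw, hkw⟩ := Option.isSome_iff_exists.mp ((PySem.List.index?_isSome_iff srcl w).mpr hw)
  unfold pvIdx at h
  rw [hkv, hkw] at h
  simp at h
  obtain ⟨h1, h2, -⟩ := PySem.List.getElem_of_index?_eq_some hkv
  obtain ⟨h1', h2', -⟩ := PySem.List.getElem_of_index?_eq_some hkw
  subst h
  rw [← h2, ← h2']

theorem pv_nodup_map_idx (srcl : List Int) (ys : List Int) (hsub : ∀ v ∈ ys, v ∈ srcl)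
    (hn : ys.Nodup) : (ys.map (pvIdx srcl)).Nodup :=
  hn.map_on (fun x hx y hy h => pvIdx_inj (hsub x hx) (hsub y hy) h)

theorem pv_fold_A (srcl tagl : List Int) (l : List Int) : ∀ (t : List Int), srcl = l ++ t →
    (l.foldl (fun d i =>
      if ¬ tagl.contains i then
        let k : Int := (((PySem.List.index? srcl i).getD 0 : Nat) : Int)
        if ¬ d.contains k then d.insert k 1 else d.insert k (d.getD k 0 + 1)
      else d) (PySem.Dict.empty : PySem.Dict Int Int)).items
    = (PySem.Set.ofList (l.filter (fun v => !tagl.contains v))).map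
        (fun v => (pvIdx srcl v, (l.count v : Int))) := by
  have hfun : (fun (d : PySem.Dict Int Int) i =>
      if ¬ tagl.contains i then
        let k : Int := (((PySem.List.index? srcl i).getD 0 : Nat) : Int)
        if ¬ d.contains k then d.insert k 1 else d.insert k (d.getD k 0 + 1)
      else d)
      = (fun (d : PySem.Dict Int Int) i =>
      if tagl.contains i then d
      else if d.contains (pvIdx srcl i) then d.insert (pvIdx srcl i) (d.getD (pvIdx srcl i) 0 + 1)
      else d.insert (pvIdx srcl i) 1) := by
    funext d i
    show (if ¬ tagl.contains i = true then
        if ¬ d.contains (pvIdx srcl i) = true then d.insert (pvIdx srcl i) 1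
        else d.insert (pvIdx srcl i) (d.getD (pvIdx srcl i) 0 + 1)
      else d) = _
    by_cases h : i ∈ tagl
    · simp [h]
    · by_cases h2 : d.contains (pvIdx srcl i) = true <;> simp [h, h2]
  rw [hfun]
  induction l using List.reverseRecOn with
  | nil => intro t ht; rfl
  | append_singleton l x ih =>
    intro t ht
    have hsrc : srcl = l ++ (x :: t) := by simpa using ht
    set step := (fun (d : PySem.Dict Int Int) i =>
      if tagl.contains i then d
      else if d.contains (pvIdx srcl i) then d.insert (pvIdx srcl i) (d.getD (pvIdx srcl i) 0 + 1)
      else d.insert (pvIdx srcl i) 1) with hstep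
    set d := l.foldl step PySem.Dict.empty with hdd
    have hd := ih (x :: t) hsrc
    rw [List.foldl_append]
    simp only [List.foldl_cons, List.foldl_nil, ← hdd]
    have hmemsub : ∀ v ∈ PySem.Set.ofList (l.filter (fun v => !tagl.contains v)), v ∈ l := by
      intro v hv
      exact (List.mem_filter.mp ((PySem.Set.mem_ofList _ _).mp hv)).1
    by_cases hx : tagl.contains x = true
    · -- not removed: dict unchanged
      have hx' : x ∈ tagl := by simpa using hx
      rw [show step d x = d by simp [hstep, hx']]
      have hfeq : (l ++ [x]).filter (fun v => !tagl.contains v)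
          = l.filter (fun v => !tagl.contains v) := by
        simp [List.filter_append, hx']
      rw [hd, hfeq]
      apply List.map_congr_left
      intro v hv
      have hvP : (!tagl.contains v) = true :=
        (List.mem_filter.mp ((PySem.Set.mem_ofList _ _).mp hv)).2
      have hvx : v ≠ x := by intro he; subst he; simp [hx'] at hvP
      simp [List.count_append, List.count_cons, hvx, Ne.symm hvx]
    · -- removed element
      have hx' : x ∉ tagl := by simpa using hx
      have hxmem : x ∈ srcl := by rw [hsrc]; simp
      have hkeys : d.keys = (PySem.Set.ofList (l.filter (fun v => !tagl.contains v))).map (pvIdx srcl) := by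
        show d.items.map Prod.fst = _
        rw [hd, List.map_map]; rfl
      have hnodk : d.keys.Nodup := by
        rw [hkeys]
        exact pv_nodup_map_idx srcl _
          (fun v hv => by rw [hsrc]; exact List.mem_append_left _ (hmemsub v hv))
          (PySem.Set.nodup_ofList _)
      have hfs : (l ++ [x]).filter (fun v => !tagl.contains v)
          = l.filter (fun v => !tagl.contains v) ++ [x] := by
        simp [List.filter_append, hx']
      by_cases hmem : x ∈ l
      · -- seen before: += 1 branch
        have hxset : x ∈ PySem.Set.ofList (l.filter (fun v => !tagl.contains v)) := by
          rw [PySem.Set.mem_ofList]; exact List.mem_filter.mpr ⟨hmem, by simp [hx']⟩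
        have hcont : d.contains (pvIdx srcl x) = true := by
          rw [PySem.Dict.contains_iff_mem_keys, hkeys]
          exact List.mem_map_of_mem hxset
        have hgd : d.getD (pvIdx srcl x) 0 = (l.count x : Int) := by
          apply PySem.Dict.getD_of_mem_items d _ hnodk
          rw [hd]
          exact List.mem_map_of_mem hxset
        rw [show step d x = d.insert (pvIdx srcl x) (d.getD (pvIdx srcl x) 0 + 1) by
          simp [hstep, hx', hcont]]
        rw [PySem.Dict.items_insert_of_contains d _ hcont]
        rw [hd, List.map_map, hfs]
        rw [PySem.Set.ofList_append_singleton, PySem.Set.add_of_mem hxset]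
        apply List.map_congr_left
        intro v hv
        have hvmem : v ∈ srcl := by rw [hsrc]; exact List.mem_append_left _ (hmemsub v hv)
        simp only [Function.comp]
        by_cases hvx : v = x
        · subst hvx
          simp [hgd, List.count_append, List.count_cons]
        · have hne : pvIdx srcl v ≠ pvIdx srcl x := fun he => hvx (pvIdx_inj hvmem hxmem he)
          rw [if_neg (by simpa using hne)]
          simp [List.count_append, List.count_cons, hvx, Ne.symm hvx]
      · -- first occurrence: insert 1
        have hxset : x ∉ PySem.Set.ofList (l.filter (fun v => !tagl.contains v)) := by
          intro hc; exact hmem (hmemsub x hc)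
        have hcont : d.contains (pvIdx srcl x) = false := by
          rw [Bool.eq_false_iff]
          intro hc
          rw [PySem.Dict.contains_iff_mem_keys, hkeys] at hc
          obtain ⟨v, hv, hve⟩ := List.mem_map.mp hc
          have hvmem : v ∈ srcl := by rw [hsrc]; exact List.mem_append_left _ (hmemsub v hv)
          have hxv : x = v := pvIdx_inj hxmem hvmem hve.symm
          subst hxv
          exact hxset hv
        rw [show step d x = d.insert (pvIdx srcl x) 1 by simp [hstep, hx', hcont]]
        rw [PySem.Dict.items_insert_of_not_contains d _ hcont]
        rw [hd, hfs]
        rw [PySem.Set.ofList_append_singleton, PySem.Set.add_of_not_mem hxset, List.map_append]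
        congr 1
        · apply List.map_congr_left
          intro v hv
          have hvx : v ≠ x := fun he => hmem (he ▸ hmemsub v hv)
          simp [List.count_append, List.count_cons, hvx, Ne.symm hvx]
        · have hc0 : List.count x l = 0 := List.count_eq_zero.mpr hmem
          simp [List.count_append, hc0]

theorem pv_filterMap_if {α β : Type} (c : α → Bool) (f : α → β) (l : List α) :
    l.filterMap (fun x => if c x then some (f x) else none) = (l.filter c).map f := by
  induction l with
  | nil => rfl
  | cons a l ih =>
    by_cases h : c a <;> simp [List.filterMap_cons, List.filter_cons, h, ih]

theorem pv_enum_filter (srcl tagl : List Int) (l : List Int) : ∀ (t : List Int), srcl = l ++ t →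
    (PySem.List.enumerate l 0).filter (fun p =>
      (!tagl.contains p.2) && (!(PySem.List.slice srcl none (some p.1)).contains p.2))
    = (PySem.Set.ofList (l.filter (fun v => !tagl.contains v))).map (fun v => (pvIdx srcl v, v)) := by
  induction l using List.reverseRecOn with
  | nil => intro t ht; rfl
  | append_singleton l x ih =>
    intro t ht
    have hsrc : srcl = l ++ (x :: t) := by simpa using ht
    rw [PySem.List.enumerate_append, List.filter_append]
    rw [ih (x :: t) hsrc]
    have htake : List.take l.length srcl = l := by rw [hsrc, List.take_left]
    by_cases hx : x ∈ tagl
    · have hfeq : (l ++ [x]).filter (fun v => !tagl.contains v)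
          = l.filter (fun v => !tagl.contains v) := by simp [List.filter_append, hx]
      rw [hfeq]
      simp [PySem.List.enumerate_cons, PySem.List.enumerate_nil, hx]
    · have hfs : (l ++ [x]).filter (fun v => !tagl.contains v)
          = l.filter (fun v => !tagl.contains v) ++ [x] := by simp [List.filter_append, hx]
      rw [hfs, PySem.Set.ofList_append_singleton]
      by_cases hmem : x ∈ l
      · have hxset : x ∈ PySem.Set.ofList (l.filter (fun v => !tagl.contains v)) := by
          rw [PySem.Set.mem_ofList]; exact List.mem_filter.mpr ⟨hmem, by simp [hx]⟩
        rw [PySem.Set.add_of_mem hxset]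
        simp [PySem.List.enumerate_cons, PySem.List.enumerate_nil, htake, hx, hmem]
      · have hxset : x ∉ PySem.Set.ofList (l.filter (fun v => !tagl.contains v)) := by
          rw [PySem.Set.mem_ofList]
          intro hc; exact hmem (List.mem_filter.mp hc).1
        rw [PySem.Set.add_of_not_mem hxset, List.map_append]
        congr 1
        have hidx : pvIdx srcl x = (l.length : Int) := by
          have h1 : PySem.List.index? srcl x = some l.length := by
            rw [hsrc, PySem.List.index?_eq_some_iff]
            exact ⟨l, t, rfl, rfl, hmem⟩
          unfold pvIdx
          rw [h1]
          rfl
        simp [PySem.List.enumerate_cons, PySem.List.enumerate_nil, htake, hx, hmem, hidx]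

theorem pv_ofList_items (ps : List (Int × Int)) (h : (ps.map Prod.fst).Nodup) :
    (PySem.Dict.ofList ps).items = ps := by
  have hf := PySem.Dict.items_foldl_insert_fresh ps Prod.fst Prod.snd
    (PySem.Dict.empty : PySem.Dict Int Int) (fun a _ => PySem.Dict.contains_empty _) h
  simpa [PySem.Dict.ofList, PySem.Dict.update] using hf

-- ===== VERDICT (by name: the statement is the Claim_ definition above) =====
theorem is_delete_spec : Claim_equal_is_delete := by
  intro srcl tagl _
  unfold Spec_is_delete is_delete is_delete_alt
  have hA := pv_fold_A srcl tagl srcl [] (by simp)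
  have hB : ((PySem.List.enumerate srcl 0).filterMap (fun p =>
      if (!tagl.contains p.2) && (!(PySem.List.slice srcl none (some p.1)).contains p.2) then
        some (p.1, (PySem.List.count srcl p.2 : Int))
      else none))
      = (PySem.Set.ofList (srcl.filter (fun v => !tagl.contains v))).map
          (fun v => (pvIdx srcl v, (srcl.count v : Int))) := by
    rw [pv_filterMap_if]
    rw [pv_enum_filter srcl tagl srcl [] (by simp), List.map_map]
    apply List.map_congr_left
    intro v _
    simp [PySem.List.count_eq]
  have hnodup : (((PySem.Set.ofList (srcl.filter (fun v => !tagl.contains v))).map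
      (fun v => (pvIdx srcl v, (srcl.count v : Int)))).map Prod.fst).Nodup := by
    rw [List.map_map]
    exact pv_nodup_map_idx srcl _
      (fun v hv => (List.mem_filter.mp ((PySem.Set.mem_ofList _ _).mp hv)).1)
      (PySem.Set.nodup_ofList _)
  simp only [hA, hB]
  split_ifs with h1
  · rfl
  · rw [pv_ofList_items _ hnodup]
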